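-- pv_equiv track=rewrite | github.com/xronocode/vibestart | donor_info/memento-main/memento/skills/analyze-local-changes/scripts/analyze.py | determine_merge_strategy
-- ===== SOURCE A (Python) =====
-- def determine_merge_strategy(changes: list[dict]) -> dict:
--     """Determine which changes can be auto-merged and which need review."""
--     auto_mergeable = []
--     requires_review = []
--
--     for change in changes:
--         change_summary = {
--             'type': change['type'],
--         }
--
--         if change['type'] == 'new_section':
--             change_summary['header'] = change['header']
--             auto_mergeable.append(change_summary)
--
--         elif change['type'] == 'added_lines':
--             change_summary['in_section'] = change['in_section']
--             auto_mergeable.append(change_summary)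
--
--         elif change['type'] == 'modified_content':
--             change_summary['in_section'] = change['in_section']
--             change_summary['reason'] = 'Content conflict - existing lines modified'
--             requires_review.append(change_summary)
--
--         elif change['type'] == 'deleted_section':
--             change_summary['header'] = change['header']
--             change_summary['reason'] = 'Section deleted locally'
--             requires_review.append(change_summary)
--
--         elif change['type'] == 'deleted_lines':
--             change_summary['in_section'] = change['in_section']
--             change_summary['reason'] = 'Lines deleted locally'
--             requires_review.append(change_summary)
--
--     return {
--         'auto_mergeable': auto_mergeable,
--         'requires_review': requires_review
--     }
-- ===== SOURCE B (Python) =====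
-- _AUTO = {'new_section': 'header', 'added_lines': 'in_section'}
-- _REVIEW = {
--     'modified_content': ('in_section', 'Content conflict - existing lines modified'),
--     'deleted_section': ('header', 'Section deleted locally'),
--     'deleted_lines': ('in_section', 'Lines deleted locally'),
-- }
--
--
-- def determine_merge_strategy(changes: list[dict]) -> dict:
--     """Determine which changes can be auto-merged and which need review."""
--     return {
--         'auto_mergeable': [
--             {'type': c['type'], _AUTO[c['type']]: c[_AUTO[c['type']]]}
--             for c in changes if c['type'] in _AUTO
--         ],
--         'requires_review': [
--             {'type': c['type'],
--              _REVIEW[c['type']][0]: c[_REVIEW[c['type']][0]],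
--              'reason': _REVIEW[c['type']][1]}
--             for c in changes if c['type'] in _REVIEW
--         ],
--     }
-- ===== Notes on version B (the rewrite author's own statement) =====
-- stated objective: simpler
-- what changed: Replaces A's single accumulator loop with five-way branching by two independent staged passes: one comprehension filters/builds the auto-mergeable summaries, a second builds the requires-review ones, each driven by a small type->field map.
import Mathlib
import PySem

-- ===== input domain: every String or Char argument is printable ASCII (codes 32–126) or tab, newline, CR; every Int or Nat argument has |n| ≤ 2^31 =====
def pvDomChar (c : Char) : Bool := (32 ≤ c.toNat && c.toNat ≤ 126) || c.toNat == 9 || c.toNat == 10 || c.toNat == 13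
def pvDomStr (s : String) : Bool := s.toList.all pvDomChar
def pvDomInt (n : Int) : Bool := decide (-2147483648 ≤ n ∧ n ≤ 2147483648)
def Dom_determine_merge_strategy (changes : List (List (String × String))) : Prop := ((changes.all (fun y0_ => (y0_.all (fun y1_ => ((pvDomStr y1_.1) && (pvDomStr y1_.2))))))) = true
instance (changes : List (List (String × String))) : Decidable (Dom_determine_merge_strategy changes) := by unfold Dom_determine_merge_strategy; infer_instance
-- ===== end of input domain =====

-- B replaces A's single accumulator loop by two independent staged comprehension passes (one per output list), each driven by a small type->field map; simpler decomposition, same O(n) cost.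


-- ===== PORT A =====
-- summaries are fresh dicts built with distinct literal keys, so dict insertion = list append (exact).
def dmsStepA (st : List (List (String × String)) × List (List (String × String)))
    (change : List (String × String)) :
    List (List (String × String)) × List (List (String × String)) :=
  match (PySem.Dict.mk change).get? "type" with
  | none => st  -- Python: KeyError here (excluded by Pre_)
  | some t =>
    if t == "new_section" then
      match (PySem.Dict.mk change).get? "header" with
      | none => st  -- Python: KeyError (excluded by Pre_)
      | some h => (st.1 ++ [[("type", t), ("header", h)]], st.2)
    else if t == "added_lines" then
      match (PySem.Dict.mk change).get? "in_section" with
      | none => st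
      | some s => (st.1 ++ [[("type", t), ("in_section", s)]], st.2)
    else if t == "modified_content" then
      match (PySem.Dict.mk change).get? "in_section" with
      | none => st
      | some s => (st.1, st.2 ++ [[("type", t), ("in_section", s),
          ("reason", "Content conflict - existing lines modified")]])
    else if t == "deleted_section" then
      match (PySem.Dict.mk change).get? "header" with
      | none => st
      | some h => (st.1, st.2 ++ [[("type", t), ("header", h),
          ("reason", "Section deleted locally")]])
    else if t == "deleted_lines" then
      match (PySem.Dict.mk change).get? "in_section" with
      | none => st
      | some s => (st.1, st.2 ++ [[("type", t), ("in_section", s),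
          ("reason", "Lines deleted locally")]])
    else st

def determine_merge_strategy (changes : List (List (String × String))) :
    List (String × List (List (String × String))) :=
  let st := changes.foldl dmsStepA ([], [])
  [("auto_mergeable", st.1), ("requires_review", st.2)]

-- ===== PORT B =====
-- Source B's two small maps: auto-mergeable type -> extra field; review type -> (extra field, reason)
def dmsAuto : List (String × String) :=
  [("new_section", "header"), ("added_lines", "in_section")]

def dmsReview : List (String × String × String) :=
  [("modified_content", ("in_section", "Content conflict - existing lines modified")),
   ("deleted_section", ("header", "Section deleted locally")),
   ("deleted_lines", ("in_section", "Lines deleted locally"))]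

-- one element of the first comprehension (none = filtered out; field KeyError excluded by Pre_)
def dmsAutoOne (c : List (String × String)) : Option (List (String × String)) :=
  match (PySem.Dict.mk c).get? "type" with
  | none => none  -- Python: KeyError (excluded by Pre_)
  | some t =>
    match (PySem.Dict.mk dmsAuto).get? t with
    | none => none  -- 'c['type'] in _AUTO' is false: filtered out
    | some extra =>
      match (PySem.Dict.mk c).get? extra with
      | none => none  -- Python: KeyError (excluded by Pre_)
      | some v => some [("type", t), (extra, v)]

-- one element of the second comprehension
def dmsReviewOne (c : List (String × String)) : Option (List (String × String)) :=
  match (PySem.Dict.mk c).get? "type" with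
  | none => none  -- Python: KeyError (excluded by Pre_)
  | some t =>
    match (PySem.Dict.mk dmsReview).get? t with
    | none => none  -- 'c['type'] in _REVIEW' is false: filtered out
    | some (extra, reason) =>
      match (PySem.Dict.mk c).get? extra with
      | none => none  -- Python: KeyError (excluded by Pre_)
      | some v => some [("type", t), (extra, v), ("reason", reason)]

def determine_merge_strategy_alt (changes : List (List (String × String))) :
    List (String × List (List (String × String))) :=
  [("auto_mergeable", changes.filterMap dmsAutoOne),
   ("requires_review", changes.filterMap dmsReviewOne)]

-- ===== PRECONDITION & SPEC =====
-- Pre_ excludes exactly the inputs where Python A raises KeyError: a change without a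
-- 'type' key, or whose recognised type lacks the field ('header'/'in_section') A copies.
def dmsPre1 (change : List (String × String)) : Bool :=
  match (PySem.Dict.mk change).get? "type" with
  | none => false
  | some t =>
    if t == "new_section" || t == "deleted_section" then
      (PySem.Dict.mk change).contains "header"
    else if t == "added_lines" || t == "modified_content" || t == "deleted_lines" then
      (PySem.Dict.mk change).contains "in_section"
    else true

def Pre_determine_merge_strategy (changes : List (List (String × String))) : Prop :=
  (changes.all dmsPre1) = true
instance (changes : List (List (String × String))) : Decidable (Pre_determine_merge_strategy changes) := by unfold Pre_determine_merge_strategy; infer_instance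

def pvWitness_determine_merge_strategy : (List (List (String × String))) :=
  [[("type", "new_section"), ("header", "H1")],
   [("type", "deleted_lines"), ("in_section", "Intro")],
   [("type", "other_kind")]]

def Spec_determine_merge_strategy (changes : List (List (String × String))) (out : List (String × List (List (String × String)))) : Prop := out = determine_merge_strategy_alt changes
instance (changes : List (List (String × String))) (out : List (String × List (List (String × String)))) : Decidable (Spec_determine_merge_strategy changes out) := by unfold Spec_determine_merge_strategy; infer_instance

-- ===== CLAIM (what is proved, stated in full; the proofs are below) =====
def Claim_equal_determine_merge_strategy : Prop := ∀ (changes : List (List (String × String))), Dom_determine_merge_strategy changes → Pre_determine_merge_strategy changes → Spec_determine_merge_strategy changes (determine_merge_strategy changes)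

-- ===== LEMMAS AND PROOFS =====

-- per-change: A's branch appends exactly the optional elements B's two comprehensions emit
theorem dms_step (c : List (String × String)) (h1 : dmsPre1 c = true)
    (am rr : List (List (String × String))) :
    dmsStepA (am, rr) c
      = (am ++ (dmsAutoOne c).toList, rr ++ (dmsReviewOne c).toList) := by
  unfold dmsPre1 at h1
  unfold dmsStepA dmsAutoOne dmsReviewOne
  cases hty : (PySem.Dict.mk c).get? "type" with
  | none => simp [hty] at h1
  | some t =>
  simp only [hty] at h1 ⊢
  rcases eq_or_ne t "new_section" with e1 | e1
  · subst e1
    have hcont : (PySem.Dict.mk c).contains "header" = true := by simpa using h1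
    cases hh : (PySem.Dict.mk c).get? "header" with
    | none => rw [(PySem.Dict.get?_eq_none_iff_contains _ _).mp hh] at hcont; cases hcont
    | some v =>
      simp only [PySem.Dict.get?] at hh
      simp [dmsAuto, dmsReview, hh, PySem.Dict.get?]
  rcases eq_or_ne t "added_lines" with e2 | e2
  · subst e2
    have hcont : (PySem.Dict.mk c).contains "in_section" = true := by simpa using h1
    cases hh : (PySem.Dict.mk c).get? "in_section" with
    | none => rw [(PySem.Dict.get?_eq_none_iff_contains _ _).mp hh] at hcont; cases hcont
    | some v =>
      simp only [PySem.Dict.get?] at hh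
      simp [dmsAuto, dmsReview, hh, PySem.Dict.get?]
  rcases eq_or_ne t "modified_content" with e3 | e3
  · subst e3
    have hcont : (PySem.Dict.mk c).contains "in_section" = true := by simpa using h1
    cases hh : (PySem.Dict.mk c).get? "in_section" with
    | none => rw [(PySem.Dict.get?_eq_none_iff_contains _ _).mp hh] at hcont; cases hcont
    | some v =>
      simp only [PySem.Dict.get?] at hh
      simp [dmsAuto, dmsReview, hh, PySem.Dict.get?]
  rcases eq_or_ne t "deleted_section" with e4 | e4
  · subst e4
    have hcont : (PySem.Dict.mk c).contains "header" = true := by simpa using h1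
    cases hh : (PySem.Dict.mk c).get? "header" with
    | none => rw [(PySem.Dict.get?_eq_none_iff_contains _ _).mp hh] at hcont; cases hcont
    | some v =>
      simp only [PySem.Dict.get?] at hh
      simp [dmsAuto, dmsReview, hh, PySem.Dict.get?]
  rcases eq_or_ne t "deleted_lines" with e5 | e5
  · subst e5
    have hcont : (PySem.Dict.mk c).contains "in_section" = true := by simpa using h1
    cases hh : (PySem.Dict.mk c).get? "in_section" with
    | none => rw [(PySem.Dict.get?_eq_none_iff_contains _ _).mp hh] at hcont; cases hcont
    | some v =>
      simp only [PySem.Dict.get?] at hh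
      simp [dmsAuto, dmsReview, hh, PySem.Dict.get?]
  -- unknown type: A's else-branch skips, both of B's map lookups fail
  have f1 : ("new_section" == t) = false := beq_eq_false_iff_ne.mpr (Ne.symm e1)
  have f2 : ("added_lines" == t) = false := beq_eq_false_iff_ne.mpr (Ne.symm e2)
  have f3 : ("modified_content" == t) = false := beq_eq_false_iff_ne.mpr (Ne.symm e3)
  have f4 : ("deleted_section" == t) = false := beq_eq_false_iff_ne.mpr (Ne.symm e4)
  have f5 : ("deleted_lines" == t) = false := beq_eq_false_iff_ne.mpr (Ne.symm e5)
  simp [dmsAuto, dmsReview, PySem.Dict.get?, List.find?, e1, e2, e3, e4, e5,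
    f1, f2, f3, f4, f5]

-- loop invariant: A's accumulator pair is the two staged filterMap passes, appended
theorem dms_loop (changes : List (List (String × String)))
    (h : Pre_determine_merge_strategy changes) :
    ∀ (am rr : List (List (String × String))),
      changes.foldl dmsStepA (am, rr)
      = (am ++ changes.filterMap dmsAutoOne, rr ++ changes.filterMap dmsReviewOne) := by
  induction changes with
  | nil => intro am rr; simp
  | cons c cs ih =>
    have hc : dmsPre1 c = true ∧ Pre_determine_merge_strategy cs := by
      simpa [Pre_determine_merge_strategy, List.all_cons, Bool.and_eq_true] using h
    intro am rr
    simp only [List.foldl_cons]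
    rw [dms_step c hc.1, ih hc.2]
    cases ha : dmsAutoOne c <;> cases hr : dmsReviewOne c <;>
      simp [ha, hr]

-- ===== VERDICT (by name: the statement is the Claim_ definition above) =====
theorem determine_merge_strategy_spec : Claim_equal_determine_merge_strategy := by
  intro changes _ hpre
  unfold Spec_determine_merge_strategy determine_merge_strategy determine_merge_strategy_alt
  rw [dms_loop changes hpre]
  simp
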